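-- pv_equiv track=rewrite | github.com/Indiana3/python_exercises | wb_chapter6/exercise144.py | countOccurencies
-- ===== SOURCE A (Python) =====
-- def countOccurencies(s):
--     # Store chars you want to remove in a list
--     chars_to_remove = [" ", ",", ";", ":", ".", "?", "!"]
--     # Remove these chars from s (if any)
--     s = "".join(ch for ch in s if not ch in chars_to_remove)
--     # Create a dictionary
--     counter = {}
--     # For each char of string, add it as key in dictionary
--     # if not already stored and add 1 to its number of occurrencies
--     for char in s:
--         if char in counter:
--             counter[char] += 1
--         else:
--             counter[char] = 1
--     return counter
-- ===== SOURCE B (Python) =====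
-- def countOccurencies(s):
--     # Collect the distinct countable characters in first-appearance order,
--     # then count each one by its own scan of the original string.
--     excluded = " ,;:.?!"
--     order = []
--     for ch in s:
--         if ch not in excluded and ch not in order:
--             order.append(ch)
--     counts = {}
--     for ch in order:
--         n = 0
--         for x in s:
--             if x == ch:
--                 n += 1
--         counts[ch] = n
--     return counts
-- ===== Notes on version B (the rewrite author's own statement) =====
-- stated objective: alternative
-- what changed: A filters the string and counts with one running dict of incremented counters; B never keeps a running counter: it first extracts the distinct non-excluded characters in first-appearance order, then for each such character performs a separate counting scan of the whole original string and stores the finished total once.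
import Mathlib
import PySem

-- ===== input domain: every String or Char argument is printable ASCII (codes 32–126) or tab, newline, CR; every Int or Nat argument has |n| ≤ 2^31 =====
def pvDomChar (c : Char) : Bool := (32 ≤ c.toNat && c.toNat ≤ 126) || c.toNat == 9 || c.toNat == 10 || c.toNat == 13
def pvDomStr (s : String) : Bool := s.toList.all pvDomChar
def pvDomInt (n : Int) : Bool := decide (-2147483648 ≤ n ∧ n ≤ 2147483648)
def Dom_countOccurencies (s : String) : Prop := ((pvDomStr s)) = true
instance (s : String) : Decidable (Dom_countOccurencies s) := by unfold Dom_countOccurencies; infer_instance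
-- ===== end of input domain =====

-- B replaces A's single running-counter dict by a two-stage algorithm: collect the distinct
-- non-excluded characters in first-appearance order, then count each by its own scan of the
-- original string (objective: a genuinely different algorithm of the same result; not faster).

-- ===== PORT A =====
def countOccurencies (s : String) : List (String × Int) :=
  let charsToRemove : List String := [" ", ",", ";", ":", ".", "?", "!"]
  -- s = "".join(ch for ch in s if not ch in chars_to_remove)
  let s' : List Char := s.toList.filter (fun ch => !(charsToRemove.contains (String.ofList [ch])))
  -- for char in s: if char in counter: counter[char] += 1 else: counter[char] = 1
  let counter : PySem.Dict String Int :=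
    s'.foldl (fun d ch =>
      let k := String.ofList [ch]
      if d.contains k then d.insert k (d.getD k 0 + 1) else d.insert k 1)
      PySem.Dict.empty
  counter.items

-- ===== PORT B =====
def countOccurencies_alt (s : String) : List (String × Int) :=
  -- excluded = " ,;:.?!"  ('ch in excluded' on a single char is char membership; exact here)
  let excluded : List Char := [' ', ',', ';', ':', '.', '?', '!']
  -- for ch in s: if ch not in excluded and ch not in order: order.append(ch)
  let order : List Char :=
    s.toList.foldl (fun acc ch =>
      if !(excluded.contains ch) && !(acc.contains ch) then acc ++ [ch] else acc) []
  -- for ch in order: n = 0; for x in s: if x == ch: n += 1; counts[ch] = n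
  let counts : PySem.Dict String Int :=
    order.foldl (fun d ch =>
      let n : Int := s.toList.foldl (fun n x => if x == ch then n + 1 else n) 0
      d.insert (String.ofList [ch]) n) PySem.Dict.empty
  counts.items

-- ===== PRECONDITION & SPEC =====
def Spec_countOccurencies (s : String) (out : List (String × Int)) : Prop := out = countOccurencies_alt s
instance (s : String) (out : List (String × Int)) : Decidable (Spec_countOccurencies s out) := by unfold Spec_countOccurencies; infer_instance

-- ===== CLAIM (what is proved, stated in full; the proofs are below) =====
def Claim_equal_countOccurencies : Prop := ∀ (s : String), Dom_countOccurencies s → Spec_countOccurencies s (countOccurencies s)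

-- ===== LEMMAS AND PROOFS =====

def pvStrOf (c : Char) : String := String.ofList [c]

lemma pvStrOf_inj : Function.Injective pvStrOf := by
  intro a b h
  have := congrArg String.toList h
  simpa [pvStrOf] using this

def pvKeep (c : Char) : Bool := !(([' ', ',', ';', ':', '.', '?', '!'] : List Char).contains c)

lemma pvSingleton_beq (c d : Char) : (pvStrOf c == pvStrOf d) = (c == d) := by
  by_cases h : c = d
  · subst h; rw [beq_self_eq_true, beq_self_eq_true]
  · rw [beq_eq_false_iff_ne.mpr (fun he => h (pvStrOf_inj he)), beq_eq_false_iff_ne.mpr h]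

-- A's string-level filter test is the char-level pvKeep
lemma pvKeepA_eq (ch : Char) :
    (!(([" ", ",", ";", ":", ".", "?", "!"] : List String).contains (String.ofList [ch])))
      = pvKeep ch := by
  have hb : ∀ d : Char, (String.ofList [ch] == pvStrOf d) = (ch == d) := fun d => pvSingleton_beq ch d
  simp only [pvKeep, List.contains_cons, List.contains_nil]
  rw [show (" " : String) = pvStrOf ' ' from rfl, show ("," : String) = pvStrOf ',' from rfl,
    show (";" : String) = pvStrOf ';' from rfl, show (":" : String) = pvStrOf ':' from rfl,
    show ("." : String) = pvStrOf '.' from rfl, show ("?" : String) = pvStrOf '?' from rfl,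
    show ("!" : String) = pvStrOf '!' from rfl,
    hb ' ', hb ',', hb ';', hb ':', hb '.', hb '?', hb '!']

-- B's first loop builds set(filter(keep, s)) in first-occurrence order
lemma pvOrder_eq (l : List Char) :
    l.foldl (fun acc ch =>
        if !(([' ', ',', ';', ':', '.', '?', '!'] : List Char).contains ch) && !(acc.contains ch)
        then acc ++ [ch] else acc) []
      = PySem.Set.ofList (l.filter pvKeep) := by
  have hcongr : l.foldl (fun acc ch =>
      if !(([' ', ',', ';', ':', '.', '?', '!'] : List Char).contains ch) && !(acc.contains ch)
      then acc ++ [ch] else acc) []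
      = l.foldl (fun acc ch => if pvKeep ch then PySem.Set.add acc ch else acc) [] := by
    apply PySem.List.foldl_congr_mem
    intro acc ch _
    show (if pvKeep ch && !(acc.contains ch) then acc ++ [ch] else acc)
        = (if pvKeep ch then PySem.Set.add acc ch else acc)
    cases hk : pvKeep ch
    · simp
    · cases hc : acc.contains ch <;> simp_all [PySem.Set.add]
  rw [hcongr, PySem.List.foldl_if_eq_foldl_filter, ← PySem.Set.ofList_eq_foldl]

-- ofList commutes with an injective map
lemma pvOfList_map (f : Char → String) (hf : Function.Injective f) (l : List Char) :
    PySem.Set.ofList (l.map f) = (PySem.Set.ofList l).map f := by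
  induction l using List.reverseRecOn with
  | nil => rfl
  | append_singleton xs x ih =>
    rw [List.map_append, List.map_singleton, PySem.Set.ofList_append_singleton,
      PySem.Set.ofList_append_singleton, ih]
    by_cases hx : x ∈ PySem.Set.ofList xs
    · rw [PySem.Set.add_of_mem hx, PySem.Set.add_of_mem (List.mem_map_of_mem hx)]
    · rw [PySem.Set.add_of_not_mem hx, PySem.Set.add_of_not_mem (by
        intro hmem
        obtain ⟨y, hy, hyx⟩ := List.mem_map.mp hmem
        exact hx (hf hyx ▸ hy)), List.map_append, List.map_singleton]

-- ===== VERDICT (by name: the statement is the Claim_ definition above) =====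
theorem countOccurencies_spec : Claim_equal_countOccurencies := by
  intro s _
  unfold Spec_countOccurencies countOccurencies countOccurencies_alt
  -- A side: rewrite the branch to the uniform insert-getD step
  have hstepA : (fun (d : PySem.Dict String Int) (ch : Char) =>
      let k := String.ofList [ch]
      if d.contains k then d.insert k (d.getD k 0 + 1) else d.insert k 1)
      = fun (d : PySem.Dict String Int) ch =>
          d.insert (String.ofList [ch]) (d.getD (String.ofList [ch]) 0 + 1) := by
    funext d ch
    by_cases h : d.contains (String.ofList [ch]) = true
    · simp [h]
    · have h' : d.contains (String.ofList [ch]) = false := by simpa using h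
      simp [h', PySem.Dict.getD_of_not_contains d (0 : Int) h']
  have hfilt : s.toList.filter
      (fun ch => !(([" ", ",", ";", ":", ".", "?", "!"] : List String).contains (String.ofList [ch])))
      = s.toList.filter pvKeep := by
    apply List.filter_congr
    intro ch _
    exact pvKeepA_eq ch
  simp only [hstepA, hfilt, pvOrder_eq]
  set l := s.toList.filter pvKeep with hl
  -- A = counter over the mapped keys
  have h1 : l.foldl (fun (d : PySem.Dict String Int) ch =>
        d.insert (String.ofList [ch]) (d.getD (String.ofList [ch]) 0 + 1)) PySem.Dict.empty
      = (l.map pvStrOf).foldl (fun (d : PySem.Dict String Int) x =>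
          d.insert x (d.getD x 0 + 1)) PySem.Dict.empty := by
    rw [List.foldl_map]
    rfl
  have hA : (l.foldl (fun (d : PySem.Dict String Int) ch =>
        d.insert (String.ofList [ch]) (d.getD (String.ofList [ch]) 0 + 1)) PySem.Dict.empty).items
      = ((PySem.Set.ofList l).map pvStrOf).map
          (fun k => (k, ((l.map pvStrOf).count k : Int))) := by
    rw [h1, PySem.Dict.foldl_insert_getD_add_one_eq_counter, PySem.Dict.items_counter,
      pvOfList_map pvStrOf pvStrOf_inj]
  rw [hA]
  -- B side: the result loop appends fresh keys
  have hnod : (PySem.Set.ofList l).Nodup := PySem.Set.nodup_ofList l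
  have hB : ((PySem.Set.ofList l).foldl (fun (d : PySem.Dict String Int) ch =>
        d.insert (String.ofList [ch])
          (s.toList.foldl (fun n x => if x == ch then n + 1 else n) (0 : Int))) PySem.Dict.empty).items
      = (PySem.Dict.empty : PySem.Dict String Int).items ++ (PySem.Set.ofList l).map (fun ch =>
          (pvStrOf ch, s.toList.foldl (fun n x => if x == ch then n + 1 else n) (0 : Int))) :=
    PySem.Dict.items_foldl_insert_fresh (l := PySem.Set.ofList l) (k := pvStrOf)
      (v := fun ch => s.toList.foldl (fun n x => if x == ch then n + 1 else n) (0 : Int))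
      (d := PySem.Dict.empty)
      (fun a _ => rfl) (List.Nodup.map pvStrOf_inj hnod)
  refine Eq.symm ?_
  rw [hB, List.map_map]
  simp only [PySem.Dict.empty, List.nil_append]
  apply List.map_congr_left
  intro c hc
  have hcl : c ∈ l := (PySem.Set.mem_ofList l c).mp hc
  have hkeep : pvKeep c = true := (List.mem_filter.mp hcl).2
  simp only [Function.comp]
  congr 1
  -- counts agree: B's inner scan over all of s counts c; A counts in the mapped filtered list
  rw [PySem.List.foldl_beq_add_one, List.count_map_of_injective _ pvStrOf pvStrOf_inj]
  have hcnt : l.count c = s.toList.count c := by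
    rw [hl, List.count_filter]
    simp [hkeep]
  rw [hcnt]
  ring
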